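-- pv_equiv track=rewrite | github.com/UnB-KnEDLe/experiments | members/lucelia/CRF/lines_to_sentences.py | lines_to_sentences
-- ===== SOURCE A (Python) =====
-- def list_of_lists_to_list_of_strings(ls):
--     return [' '.join(l) for l in ls]
--
-- def lines_to_sentences(lines):
--     """
--     Só funciona se último elemento de lines for '\n',
--     se não for assim no seu caso adicione um no final
--     caso contrário vai pular a última sentença
--     """
--     sentences = []
--     labels = []
--     sentence = []
--     label = []
--     for line in lines:
--         if line == '\n':
--             sentences.append(sentence)
--             labels.append(label)
--             sentence = []
--             label = []
--         else:
--             word, word_label = line.strip('\n').split('\t')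
--             sentence.append(word)
--             label.append(word_label)
--
--     sentences = list_of_lists_to_list_of_strings(sentences)
--     labels = list_of_lists_to_list_of_strings(labels)
--     return sentences, labels
-- ===== SOURCE B (Python) =====
-- def parse_line(line):
--     word, label = line.strip('\n').split('\t')
--     return word, label
--
-- def sentences_of(pairs):
--     # recursion on the first sentence-break marker (None)
--     try:
--         k = pairs.index(None)
--     except ValueError:
--         return [], []
--     sent = ' '.join(w for w, _ in pairs[:k])
--     lab = ' '.join(t for _, t in pairs[:k])
--     rest_sentences, rest_labels = sentences_of(pairs[k + 1:])
--     return [sent] + rest_sentences, [lab] + rest_labels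
--
-- def lines_to_sentences(lines):
--     # Parse every data line once up front ('\n' becomes a None marker),
--     # then split the parsed stream recursively at the first None marker.
--     pairs = [None if line == '\n' else parse_line(line) for line in lines]
--     return sentences_of(pairs)
-- ===== Notes on version B (the rewrite author's own statement) =====
-- stated objective: alternative
-- what changed: B replaces A's iterative accumulate-and-flush loop (four running buffers) by a parse-then-group decomposition: every line is parsed once up front into a (word,label) pair ('\n' becoming a None marker), and a recursive helper splits the parsed stream at the first marker with list.index, the index ValueError on a marker-free remainder terminating the recursion and dropping the trailing unterminated segment.
import Mathlib
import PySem

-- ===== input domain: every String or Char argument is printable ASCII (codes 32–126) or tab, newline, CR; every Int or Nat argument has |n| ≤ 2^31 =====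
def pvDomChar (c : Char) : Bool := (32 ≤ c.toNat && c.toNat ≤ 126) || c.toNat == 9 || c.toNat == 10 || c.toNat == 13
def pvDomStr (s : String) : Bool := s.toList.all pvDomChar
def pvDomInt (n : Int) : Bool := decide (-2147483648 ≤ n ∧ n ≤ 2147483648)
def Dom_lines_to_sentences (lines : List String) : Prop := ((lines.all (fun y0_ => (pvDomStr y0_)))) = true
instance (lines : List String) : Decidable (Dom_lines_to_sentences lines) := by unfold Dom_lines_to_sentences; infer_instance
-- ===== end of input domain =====

-- B replaces A's iterative accumulate-and-flush loop by recursion on the first '\n':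
-- parse and join the slice before it, recurse on the slice after it (same cost, different structure).
-- Pre_ excludes inputs on which A raises ValueError (a non-'\n' line whose tab-split is not exactly 2 fields).

-- line.strip('\n').split('\t') — shared shape of one data line
def pvLineParts (line : String) : List String :=
  -- split? with the non-empty separator "\t" is always `some`; the getD [] is never taken
  (PySem.Str.split? (PySem.Str.stripChars line "\n") "\t").getD []

-- ===== PORT A =====
def list_of_lists_to_list_of_strings (ls : List (List String)) : List String :=
  ls.map (fun l => PySem.Str.join " " l)

-- one iteration of A's for-loop; on a data line Python unpacks exactly 2 fields
-- (raises ValueError otherwise — excluded by Pre_); the port reads fields 0 and 1.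
def pvAStep (st : List (List String) × List (List String) × List String × List String)
    (line : String) : List (List String) × List (List String) × List String × List String :=
  let (sentences, labels, sentence, label) := st
  if line == "\n" then
    (sentences ++ [sentence], labels ++ [label], [], [])
  else
    let parts := pvLineParts line
    let word := parts.getD 0 ""
    let word_label := parts.getD 1 ""
    (sentences, labels, sentence ++ [word], label ++ [word_label])

def lines_to_sentences (lines : List String) : List String × List String :=
  let st := lines.foldl pvAStep ([], [], [], [])
  (list_of_lists_to_list_of_strings st.1, list_of_lists_to_list_of_strings st.2.1)

-- ===== PORT B =====
-- parse_line: Python unpacks exactly 2 fields (raises ValueError otherwise — excluded by Pre_);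
-- the port reads fields 0 and 1
def pvParsePair (line : String) : String × String :=
  ((pvLineParts line).getD 0 "", (pvLineParts line).getD 1 "")

-- the comprehension's per-line value: '\n' becomes the None marker, a data line its parsed pair
def pvEnc (line : String) : Option (String × String) :=
  if line == "\n" then none else some (pvParsePair line)

-- Source B sentences_of: pairs.index(None) → PySem.List.index?; the except ValueError branch is the
-- none case; the slices pairs[:k] / pairs[k+1:] (k a nonnegative index) are take k / drop (k+1);
-- Python unpacks each element of pairs[:k] as a 2-tuple (before the first None they all are;
-- the getD ("","") default is never taken)
def pvSentencesOf (pairs : List (Option (String × String))) : List String × List String :=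
  match h : PySem.List.index? pairs none with
  | none => ([], [])
  | some k =>
    let seg := pairs.take k
    let sent := PySem.Str.join " " (seg.map (fun p => (p.getD ("", "")).1))
    let lab := PySem.Str.join " " (seg.map (fun p => (p.getD ("", "")).2))
    let rest := pvSentencesOf (pairs.drop (k + 1))
    (sent :: rest.1, lab :: rest.2)
termination_by pairs.length
decreasing_by
  obtain ⟨hk, -, -⟩ := PySem.List.getElem_of_index?_eq_some h
  simp only [List.length_drop]
  omega

def lines_to_sentences_alt (lines : List String) : List String × List String :=
  pvSentencesOf (lines.map pvEnc)

-- ===== PRECONDITION & SPEC =====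
-- excludes exactly the inputs on which A raises ValueError: a line ≠ '\n' that does not split into exactly 2 tab-separated fields
def Pre_lines_to_sentences (lines : List String) : Prop :=
  ∀ line ∈ lines, line ≠ "\n" → (pvLineParts line).length = 2
instance (lines : List String) : Decidable (Pre_lines_to_sentences lines) := by
  unfold Pre_lines_to_sentences; infer_instance
def pvWitness_lines_to_sentences : List String := ["a\tb", "c\td", "\n", "\n", "e\tf", "\n", "tail\tdropped"]
def Spec_lines_to_sentences (lines : List String) (out : List String × List String) : Prop := out = lines_to_sentences_alt lines
instance (lines : List String) (out : List String × List String) : Decidable (Spec_lines_to_sentences lines out) := by unfold Spec_lines_to_sentences; infer_instance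

-- ===== CLAIM (what is proved, stated in full; the proofs are below) =====
def Claim_equal_lines_to_sentences : Prop := ∀ (lines : List String), Dom_lines_to_sentences lines → Pre_lines_to_sentences lines → Spec_lines_to_sentences lines (lines_to_sentences lines)

-- ===== LEMMAS AND PROOFS =====

def pvWordOf (line : String) : String := (pvLineParts line).getD 0 ""
def pvLabelOf (line : String) : String := (pvLineParts line).getD 1 ""

-- A's fold only ever appends to the sentences/labels buffers: the initial prefix factors out
theorem pvFold_shift (rest : List String) (S L : List (List String)) (s l : List String) :
    rest.foldl pvAStep (S, L, s, l) =
      ((S ++ (rest.foldl pvAStep ([], [], s, l)).1,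
        L ++ (rest.foldl pvAStep ([], [], s, l)).2.1,
        (rest.foldl pvAStep ([], [], s, l)).2.2.1,
        (rest.foldl pvAStep ([], [], s, l)).2.2.2)) := by
  induction rest generalizing S L s l with
  | nil => simp
  | cons x xs ih =>
      simp only [List.foldl_cons]
      by_cases hx : x = "\n"
      · subst hx
        rw [show pvAStep (S, L, s, l) "\n" = (S ++ [s], L ++ [l], [], []) from by
              simp [pvAStep],
            show pvAStep (([] : List (List String)), ([] : List (List String)), s, l) "\n"
              = ([s], [l], [], []) from by simp [pvAStep],
            ih (S ++ [s]) (L ++ [l]) [] [], ih [s] [l] [] []]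
        simp
      · rw [show pvAStep (S, L, s, l) x
              = (S, L, s ++ [pvWordOf x], l ++ [pvLabelOf x]) from by
              simp [pvAStep, hx, pvWordOf, pvLabelOf],
            show pvAStep (([] : List (List String)), ([] : List (List String)), s, l) x
              = ([], [], s ++ [pvWordOf x], l ++ [pvLabelOf x]) from by
              simp [pvAStep, hx, pvWordOf, pvLabelOf],
            ih S L _ _, ih [] [] _ _]

-- a '\n'-free prefix only grows the current sentence/label buffers
theorem pvFold_noNl (pre : List String) (hpre : "\n" ∉ pre)
    (S L : List (List String)) (s l : List String) :
    pre.foldl pvAStep (S, L, s, l) =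
      (S, L, s ++ pre.map pvWordOf, l ++ pre.map pvLabelOf) := by
  induction pre generalizing s l with
  | nil => simp
  | cons x xs ih =>
      have hx : x ≠ "\n" := fun h => hpre (h ▸ List.mem_cons_self)
      simp only [List.foldl_cons]
      rw [show pvAStep (S, L, s, l) x = (S, L, s ++ [pvWordOf x], l ++ [pvLabelOf x]) from by
            simp [pvAStep, hx, pvWordOf, pvLabelOf],
          ih (fun hm => hpre (List.mem_cons_of_mem _ hm))]
      simp

-- sentences_of on a marker-free list: the except ValueError branch
theorem pvSent_none (pairs : List (Option (String × String))) (h : none ∉ pairs) :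
    pvSentencesOf pairs = ([], []) := by
  rw [pvSentencesOf.eq_def]
  split
  next => rfl
  next k h' =>
      obtain ⟨p1, p2, heq, -, -⟩ := (PySem.List.index?_eq_some_iff _ _ _).mp h'
      exact absurd (heq ▸ (List.mem_append_right p1 List.mem_cons_self)) h

-- sentences_of splits at the first marker
theorem pvSent_split (pre suf : List (Option (String × String)))
    (h : (none : Option (String × String)) ∉ pre) :
    pvSentencesOf (pre ++ none :: suf) =
      (PySem.Str.join " " (pre.map (fun p => (p.getD ("", "")).1)) :: (pvSentencesOf suf).1,
       PySem.Str.join " " (pre.map (fun p => (p.getD ("", "")).2)) :: (pvSentencesOf suf).2) := by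
  have hidx : PySem.List.index? (pre ++ none :: suf) (none : Option (String × String))
      = some pre.length :=
    (PySem.List.index?_eq_some_iff _ _ _).mpr ⟨pre, suf, rfl, rfl, h⟩
  rw [pvSentencesOf.eq_def]
  split
  next h' => exact absurd (h'.symm.trans hidx) (by simp)
  next k h' =>
      have hk : k = pre.length := by
        have := h'.symm.trans hidx
        exact Option.some.inj this
      subst hk
      have htake : (pre ++ none :: suf).take pre.length = pre := by simp
      have hdrop : (pre ++ none :: suf).drop (pre.length + 1) = suf := by
        rw [show pre ++ none :: suf = (pre ++ [none]) ++ suf by simp,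
          show pre.length + 1 = (pre ++ [(none : Option (String × String))]).length by simp]
        exact List.drop_left
      rw [htake, hdrop]

theorem pvMainAux : ∀ (n : Nat) (lines : List String), lines.length ≤ n →
    lines_to_sentences lines = lines_to_sentences_alt lines := by
  intro n
  induction n with
  | zero =>
      intro lines hle
      have h0 : lines = [] := by cases lines <;> simp_all
      subst h0
      simp [lines_to_sentences, lines_to_sentences_alt, list_of_lists_to_list_of_strings,
        pvSent_none [] (by simp)]
  | succ n ih =>
      intro lines hle
      unfold lines_to_sentences_alt
      cases hidx : PySem.List.index? lines "\n" with
      | none =>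
          have hnm : "\n" ∉ lines := (PySem.List.index?_eq_none_iff _ _).mp hidx
          have hmap : (none : Option (String × String)) ∉ lines.map pvEnc := by
            intro hm
            obtain ⟨x, hx, hex⟩ := List.mem_map.mp hm
            by_cases hxe : x = "\n"
            · exact hnm (hxe ▸ hx)
            · simp [pvEnc, hxe] at hex
          rw [pvSent_none _ hmap]
          simp [lines_to_sentences, pvFold_noNl lines hnm, list_of_lists_to_list_of_strings]
      | some k =>
          obtain ⟨pre, suf, hLines, hlen, hnm⟩ := (PySem.List.index?_eq_some_iff _ _ _).mp hidx
          subst hLines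
          have hmapnm : (none : Option (String × String)) ∉ pre.map pvEnc := by
            intro hm
            obtain ⟨x, hx, hex⟩ := List.mem_map.mp hm
            by_cases hxe : x = "\n"
            · exact hnm (hxe ▸ hx)
            · simp [pvEnc, hxe] at hex
          have hmap : (pre ++ "\n" :: suf).map pvEnc
              = pre.map pvEnc ++ none :: suf.map pvEnc := by
            simp [pvEnc]
          rw [hmap, pvSent_split _ _ hmapnm]
          have ih' := ih suf (by
            simp only [List.length_append, List.length_cons] at hle; omega)
          rw [show pvSentencesOf (suf.map pvEnc) = lines_to_sentences_alt suf from rfl, ← ih']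
          simp only [lines_to_sentences, List.foldl_append, List.foldl_cons]
          rw [pvFold_noNl pre hnm [] [] [] []]
          rw [show pvAStep (([] : List (List String)), ([] : List (List String)),
                [] ++ pre.map pvWordOf, [] ++ pre.map pvLabelOf) "\n"
                = ([pre.map pvWordOf], [pre.map pvLabelOf], [], []) from by simp [pvAStep]]
          rw [pvFold_shift suf [pre.map pvWordOf] [pre.map pvLabelOf] [] []]
          have hw : List.map (fun p => (p.getD ("", "")).1) (pre.map pvEnc)
              = pre.map pvWordOf := by
            rw [List.map_map]
            refine List.map_congr_left fun x hx => ?_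
            have hxe : x ≠ "\n" := fun he => hnm (he ▸ hx)
            simp [pvEnc, hxe, pvParsePair, pvWordOf, Function.comp]
          have hlb : List.map (fun p => (p.getD ("", "")).2) (pre.map pvEnc)
              = pre.map pvLabelOf := by
            rw [List.map_map]
            refine List.map_congr_left fun x hx => ?_
            have hxe : x ≠ "\n" := fun he => hnm (he ▸ hx)
            simp [pvEnc, hxe, pvParsePair, pvLabelOf, Function.comp]
          rw [hw, hlb]
          simp [list_of_lists_to_list_of_strings]

theorem pvMain (lines : List String) :
    lines_to_sentences lines = lines_to_sentences_alt lines :=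
  pvMainAux lines.length lines (Nat.le_refl _)

-- ===== VERDICT =====
theorem lines_to_sentences_spec : Claim_equal_lines_to_sentences := by
  intro lines _ _
  unfold Spec_lines_to_sentences
  exact pvMain lines
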